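-- pv_equiv track=rewrite | github.com/Zynk-dot/notes | chatbot.py | rank_chunks_by_relevance
-- ===== SOURCE A (Python) =====
-- def rank_chunks_by_relevance(chunks, question):
--     """
--     Ranks chunks by their relevance to the question using simple keyword matching.
--     """
--     question_tokens = set(question.lower().split())
--     ranked_chunks = []
--
--     for chunk in chunks:
--         chunk_tokens = set(chunk.lower().split())
--         common_tokens = question_tokens.intersection(chunk_tokens)
--         score = len(common_tokens)
--         ranked_chunks.append((chunk, score))
--
--     ranked_chunks.sort(key=lambda x: x[1], reverse=True)
--     return [chunk for chunk, _ in ranked_chunks if _ > 0]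
-- ===== SOURCE B (Python) =====
-- def rank_chunks_by_relevance(chunks, question):
--     """
--     Bucket (counting) sort over integer scores instead of a comparison sort:
--     group chunks by score in one pass, then emit buckets from the highest
--     score down to 1, preserving original order inside each bucket.
--     """
--     question_tokens = set(question.lower().split())
--     buckets = {}
--     best = 0
--     for chunk in chunks:
--         score = len(question_tokens & set(chunk.lower().split()))
--         best = max(best, score)
--         if score > 0:
--             buckets.setdefault(score, []).append(chunk)
--     result = []
--     for s in range(best, 0, -1):
--         result.extend(buckets.get(s, []))
--     return result
-- ===== Notes on version B (the rewrite author's own statement) =====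
-- stated objective: alternative
-- what changed: Replaces A's stable comparison sort of (chunk, score) pairs with a one-pass bucket (counting) sort: chunks are grouped into a dict score -> chunks, then buckets are emitted from the highest score down to 1, which also subsumes the score > 0 filter.
import Mathlib
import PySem

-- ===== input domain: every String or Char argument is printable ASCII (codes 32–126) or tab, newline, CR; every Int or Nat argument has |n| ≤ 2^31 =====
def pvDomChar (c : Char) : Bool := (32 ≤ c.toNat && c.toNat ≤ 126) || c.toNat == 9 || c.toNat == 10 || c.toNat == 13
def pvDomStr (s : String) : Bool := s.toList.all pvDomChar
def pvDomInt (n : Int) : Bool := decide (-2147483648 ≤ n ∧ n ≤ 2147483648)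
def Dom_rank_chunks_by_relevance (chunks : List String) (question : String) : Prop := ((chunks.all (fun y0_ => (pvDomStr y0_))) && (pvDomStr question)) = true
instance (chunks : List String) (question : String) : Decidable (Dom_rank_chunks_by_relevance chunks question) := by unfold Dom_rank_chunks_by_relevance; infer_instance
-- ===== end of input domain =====

-- B replaces A's comparison sort by a bucket (counting) sort over the integer scores:
-- one grouping pass into a dict score -> chunks, then buckets emitted from the highest
-- score down to 1 (objective: alternative algorithm of similar cost).

-- shared helper: set(s.lower().split()) — used verbatim by both Pythons
def pvTokens (s : String) : PySem.Set String :=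
  PySem.Set.ofList (PySem.Str.split₀ (PySem.Str.lower s))

-- shared helper: len(question_tokens & set(chunk.lower().split()))
def pvScore (qt : PySem.Set String) (chunk : String) : Int :=
  PySem.Set.len (PySem.Set.inter qt (pvTokens chunk))

-- ===== PORT A =====
def rank_chunks_by_relevance (chunks : List String) (question : String) : List String :=
  let question_tokens := pvTokens question
  let ranked_chunks : List (String × Int) :=
    chunks.foldl (fun acc chunk => acc ++ [(chunk, pvScore question_tokens chunk)]) []
  let sorted_chunks := PySem.List.sorted ranked_chunks (fun x => x.2) true
  (sorted_chunks.filter (fun p => decide (0 < p.2))).map (fun p => p.1)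

-- ===== PORT B =====
def rank_chunks_by_relevance_alt (chunks : List String) (question : String) : List String :=
  let question_tokens := pvTokens question
  let st : Int × PySem.Dict Int (List String) :=
    chunks.foldl (fun st chunk =>
      (max st.1 (pvScore question_tokens chunk),
       if 0 < pvScore question_tokens chunk
       then st.2.modify (pvScore question_tokens chunk) [] (fun l => l ++ [chunk])
       else st.2))
      (0, PySem.Dict.empty)
  (PySem.List.pyRange st.1 0 (-1)).foldl (fun acc s => acc ++ st.2.getD s []) []

-- ===== PRECONDITION & SPEC =====
def Spec_rank_chunks_by_relevance (chunks : List String) (question : String) (out : List String) : Prop := out = rank_chunks_by_relevance_alt chunks question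
instance (chunks : List String) (question : String) (out : List String) : Decidable (Spec_rank_chunks_by_relevance chunks question out) := by unfold Spec_rank_chunks_by_relevance; infer_instance

-- ===== CLAIM (what is proved, stated in full; the proofs are below) =====
def Claim_equal_rank_chunks_by_relevance : Prop := ∀ (chunks : List String) (question : String), Dom_rank_chunks_by_relevance chunks question → Spec_rank_chunks_by_relevance chunks question (rank_chunks_by_relevance chunks question)

-- ===== LEMMAS AND PROOFS =====

-- inserting x at its (rev-)sorted place after equal keys: effect on a per-key filter
theorem pv_insertBy_filter {α : Type} (key : α → Int) (v : Int) (x : α) :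
    ∀ (l : List α), l.Pairwise (fun a b => key b ≤ key a) →
    (PySem.List.insertBy (fun a b => decide (key b < key a)) x l).filter (fun a => key a == v)
      = if key x = v then l.filter (fun a => key a == v) ++ [x]
        else l.filter (fun a => key a == v) := by
  intro l
  induction l with
  | nil =>
    intro _
    simp [PySem.List.insertBy]
    split_ifs with h
    · simp [h]
    · simp [h]
  | cons y t ih =>
    intro hp
    have hpt := (List.pairwise_cons.mp hp).2
    have hy : ∀ a ∈ t, key a ≤ key y := (List.pairwise_cons.mp hp).1
    by_cases hb : key y < key x
    · -- insert here: x :: y :: t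
      have : PySem.List.insertBy (fun a b => decide (key b < key a)) x (y :: t)
          = x :: y :: t := by simp [PySem.List.insertBy, hb]
      rw [this]
      by_cases hv : key x = v
      · -- all of y :: t have key < v, so the filter of y :: t is []
        have hnil : (y :: t).filter (fun a => key a == v) = [] := by
          apply List.filter_eq_nil_iff.mpr
          intro a ha
          have : key a ≤ key y := by
            rcases ha with _ | ha
            · exact le_refl _
            · exact hy a (by assumption)
          simp only [beq_iff_eq]
          omega
        simp [hv, hnil]
      · simp [hv, List.filter_cons]
    · have : PySem.List.insertBy (fun a b => decide (key b < key a)) x (y :: t)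
          = y :: PySem.List.insertBy (fun a b => decide (key b < key a)) x t := by
        simp [PySem.List.insertBy, hb]
      rw [this]
      rw [List.filter_cons, List.filter_cons, ih hpt]
      by_cases hyv : key y = v <;> by_cases hxv : key x = v <;>
        simp [hyv, hxv]

-- stability of Python's reverse sort, expressed per key value
theorem pv_filter_sorted_rev {α : Type} (key : α → Int) (xs : List α) (v : Int) :
    (PySem.List.sorted xs key true).filter (fun a => key a == v)
      = xs.filter (fun a => key a == v) := by
  induction xs using List.reverseRecOn with
  | nil => simp [PySem.List.sorted_rev_eq_foldl_insertBy]
  | append_singleton t x ih =>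
    have hstep : PySem.List.sorted (t ++ [x]) key true
        = PySem.List.insertBy (fun a b => decide (key b < key a)) x (PySem.List.sorted t key true) := by
      rw [PySem.List.sorted_rev_eq_foldl_insertBy, PySem.List.sorted_rev_eq_foldl_insertBy,
        List.foldl_append]
      rfl
    rw [hstep, pv_insertBy_filter key v x _ (PySem.List.sorted_pairwise_rev t key), ih,
      List.filter_append]
    by_cases hxv : key x = v <;> simp [hxv]

-- two key-descending lists with the same per-key filters are equal
theorem pv_eq_of_desc_of_filter_eq {α : Type} (key : α → Int) :
    ∀ (l1 l2 : List α), l1.Pairwise (fun a b => key b ≤ key a) →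
    l2.Pairwise (fun a b => key b ≤ key a) →
    (∀ v, l1.filter (fun a => key a == v) = l2.filter (fun a => key a == v)) →
    l1 = l2 := by
  intro l1
  induction l1 with
  | nil =>
    intro l2 _ _ hf
    cases l2 with
    | nil => rfl
    | cons b t2 =>
      have := hf (key b)
      simp at this
  | cons a t1 ih =>
    intro l2 h1 h2 hf
    cases l2 with
    | nil =>
      have := hf (key a)
      simp at this
    | cons b t2 =>
      have ha1 : ∀ c ∈ t1, key c ≤ key a := (List.pairwise_cons.mp h1).1
      have hb2 : ∀ c ∈ t2, key c ≤ key b := (List.pairwise_cons.mp h2).1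
      -- key a = key b
      have hkeq : key a = key b := by
        by_contra hne
        -- filter of l2 at key a is nonempty and lives in t2
        have h2a := hf (key a)
        have h2b := hf (key b)
        rw [List.filter_cons, List.filter_cons] at h2a h2b
        simp only [BEq.rfl, if_pos, beq_iff_eq] at h2a h2b
        rw [if_neg (by simpa using fun h => hne h.symm)] at h2a
        rw [if_neg (by simpa using hne)] at h2b
        -- a :: _ = filter t2, so ∃ y ∈ t2, key y = key a
        have hmem1 : a ∈ t2.filter (fun c => key c == key a) := by
          rw [← h2a]; simp
        have hmem2 : b ∈ t1.filter (fun c => key c == key b) := by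
          rw [h2b]; simp
        have h1' := (List.mem_filter.mp hmem1)
        have h2' := (List.mem_filter.mp hmem2)
        have := hb2 a h1'.1
        have := ha1 b h2'.1
        simp only [beq_iff_eq] at h1' h2'
        omega
      -- heads equal
      have hfa := hf (key a)
      rw [List.filter_cons, List.filter_cons] at hfa
      rw [if_pos (by simp)] at hfa
      rw [if_pos (by simp [hkeq])] at hfa
      have hab : a = b := by
        have := hfa
        simp at this
        exact this.1
      have htl : t1.filter (fun c => key c == key a) = t2.filter (fun c => key c == key a) := by
        have := hfa
        simp at this
        exact this.2
      subst hab
      congr 1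
      apply ih t2 (List.pairwise_cons.mp h1).2 (List.pairwise_cons.mp h2).2
      intro v
      by_cases hv : key a = v
      · rw [← hv]; exact htl
      · have := hf v
        rw [List.filter_cons, List.filter_cons] at this
        rw [if_neg (by simpa using hv), if_neg (by simpa using hv)] at this
        exact this

-- the bucket concatenation over a strictly descending value list is key-descending
theorem pv_flatMap_pairwise {α : Type} (key : α → Int) (xs : List α) :
    ∀ (D : List Int), D.Pairwise (· > ·) →
    (D.flatMap (fun v => xs.filter (fun a => key a == v))).Pairwise (fun a b => key b ≤ key a) := by
  intro D
  induction D with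
  | nil => simp
  | cons v T ih =>
    intro hD
    rw [List.flatMap_cons, List.pairwise_append]
    refine ⟨?_, ih (List.pairwise_cons.mp hD).2, ?_⟩
    · have hall : ∀ a ∈ xs.filter (fun a => key a == v), key a = v := fun a ha => by
        simpa using (List.mem_filter.mp ha).2
      apply List.Pairwise.imp_of_mem (l := xs.filter (fun a => key a == v))
        (R := fun _ _ => True) ?_ ?_
      · intro a b ha hb _
        rw [hall a ha, hall b hb]
      · exact List.pairwise_of_forall_mem_list (fun _ _ _ _ => trivial)
    · intro a ha b hb
      have hva : key a = v := by simpa using (List.mem_filter.mp ha).2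
      obtain ⟨w, hw, hbw⟩ := List.mem_flatMap.mp hb
      have hvb : key b = w := by simpa using (List.mem_filter.mp hbw).2
      have : v > w := (List.pairwise_cons.mp hD).1 w hw
      omega

-- per-key filters of the bucket concatenation
theorem pv_flatMap_filter {α : Type} (key : α → Int) (xs : List α) (w : Int) :
    ∀ (D : List Int), D.Pairwise (· > ·) →
    (D.flatMap (fun v => xs.filter (fun a => key a == v))).filter (fun a => key a == w)
      = if w ∈ D then xs.filter (fun a => key a == w) else [] := by
  intro D
  induction D with
  | nil => simp
  | cons v T ih =>
    intro hD
    rw [List.flatMap_cons, List.filter_append, ih (List.pairwise_cons.mp hD).2]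
    by_cases hvw : v = w
    · subst hvw
      have hT : v ∉ T := fun h => by
        have := (List.pairwise_cons.mp hD).1 v h; omega
      rw [if_neg hT, if_pos (List.mem_cons_self)]
      rw [List.filter_filter]
      simp
    · have hbucket : (xs.filter (fun a => key a == v)).filter (fun a => key a == w) = [] := by
        apply List.filter_eq_nil_iff.mpr
        intro a ha
        have h1 : key a = v := by simpa using (List.mem_filter.mp ha).2
        simp only [beq_iff_eq]
        omega
      have hiff : (w ∈ T) ↔ (w ∈ v :: T) := by
        constructor
        · exact fun h => List.mem_cons.mpr (Or.inr h)
        · intro h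
          rcases List.mem_cons.mp h with h | h
          · exact absurd h.symm hvw
          · exact h
      rw [hbucket, List.nil_append, if_congr hiff rfl rfl]

-- a stable reverse sort IS the bucket concatenation, for any strictly descending
-- value list covering all keys
theorem pv_sorted_eq_flatMap {α : Type} (key : α → Int) (xs : List α) (D : List Int)
    (hD : D.Pairwise (· > ·)) (hmem : ∀ a ∈ xs, key a ∈ D) :
    PySem.List.sorted xs key true = D.flatMap (fun v => xs.filter (fun a => key a == v)) := by
  apply pv_eq_of_desc_of_filter_eq key _ _ (PySem.List.sorted_pairwise_rev xs key)
    (pv_flatMap_pairwise key xs D hD)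
  intro v
  rw [pv_filter_sorted_rev, pv_flatMap_filter key xs v D hD]
  by_cases hv : v ∈ D
  · rw [if_pos hv]
  · rw [if_neg hv, List.filter_eq_nil_iff.mpr]
    intro a ha
    simp only [beq_iff_eq]
    intro h
    exact hv (h ▸ hmem a ha)

-- pyRange m 0 (-1) is strictly descending
theorem pv_pyRange_desc (m : Int) : (PySem.List.pyRange m 0 (-1)).Pairwise (· > ·) := by
  rw [PySem.List.pyRange_neg_one_eq_reverse, List.pairwise_reverse]
  exact (PySem.List.pairwise_lt_pyRange_one 1 (m+1)).imp (fun h => h)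

-- the two ports agree on every input
theorem pv_main_eq (chunks : List String) (question : String) :
    rank_chunks_by_relevance chunks question = rank_chunks_by_relevance_alt chunks question := by
  unfold rank_chunks_by_relevance rank_chunks_by_relevance_alt
  simp only
  set qt := pvTokens question with hqt
  set sc : String → Int := fun c => pvScore qt c with hsc
  -- score facts
  have hsc0 : ∀ c, 0 ≤ sc c := by
    intro c
    show 0 ≤ pvScore qt c
    simp only [pvScore, PySem.Set.len]
    exact Int.natCast_nonneg _
  -- A's loop builds the pair list
  rw [PySem.List.foldl_append_singleton_eq_map (f := fun chunk => (chunk, sc chunk))]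
  set pairs := chunks.map (fun c => (c, sc c)) with hpairs
  -- B's loop: split the two accumulators
  rw [PySem.List.foldl_prod_mk (f := fun acc chunk => max acc (sc chunk))
      (g := fun d chunk => if 0 < sc chunk then PySem.Dict.modify d (sc chunk) [] (fun l => l ++ [chunk]) else d)]
  simp only
  set best := chunks.foldl (fun acc chunk => max acc (sc chunk)) 0 with hbest
  have hbest0 : 0 ≤ best := (PySem.List.le_foldl_max_int chunks sc 0).1
  have hbestle : ∀ c ∈ chunks, sc c ≤ best := (PySem.List.le_foldl_max_int chunks sc 0).2
  -- B's dict
  rw [PySem.List.foldl_ite_eq_foldl_filter (p := fun chunk => 0 < sc chunk)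
      (f := fun d chunk => PySem.Dict.modify d (sc chunk) [] (fun l => l ++ [chunk]))]
  set fl := chunks.filter (fun c => decide (0 < sc c)) with hfl
  have hfold : fl.foldl (fun d chunk => PySem.Dict.modify d (sc chunk) [] (fun l => l ++ [chunk])) PySem.Dict.empty
      = (fl.map (fun c => (sc c, c))).foldl (fun d p => PySem.Dict.modify d p.1 [] (fun l => l ++ [p.2])) PySem.Dict.empty := by
    rw [List.foldl_map]
  rw [hfold]
  set d := (fl.map (fun c => (sc c, c))).foldl (fun d p => PySem.Dict.modify d p.1 [] (fun l => l ++ [p.2])) PySem.Dict.empty with hd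
  have hgetD : ∀ s : Int, d.getD s [] = fl.filter (fun c => sc c == s) := by
    intro s
    rw [hd, PySem.Dict.getD_foldl_modify_append]
    rw [List.filter_map]
    rw [List.map_map,
        show ((fun x : Int × String => x.2) ∘ fun c => (sc c, c)) = id from rfl,
        show ((fun p : Int × String => p.1 == s) ∘ fun c => (sc c, c)) = (fun c => sc c == s) from rfl,
        List.map_id]
    simp
  -- B's output loop
  rw [PySem.List.foldl_append_eq_flatMap]
  rw [List.nil_append]
  -- A's sort as buckets over D = pyRange best 0 (-1) ++ [0]
  set R := PySem.List.pyRange best 0 (-1) with hR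
  have hRpos : ∀ s ∈ R, 0 < s := by
    intro s hs
    exact (PySem.List.mem_pyRange_neg_one.mp hs).1
  have hDpair : (R ++ [0]).Pairwise (· > ·) := by
    rw [List.pairwise_append]
    refine ⟨pv_pyRange_desc best, by simp, ?_⟩
    intro s hs y hy
    simp at hy
    subst hy
    exact hRpos s hs
  have hDmem : ∀ p ∈ pairs, p.2 ∈ R ++ [0] := by
    intro p hp
    obtain ⟨c, hc, rfl⟩ := List.mem_map.mp hp
    by_cases h0 : sc c = 0
    · simp [h0]
    · have := hsc0 c
      have := hbestle c hc
      apply List.mem_append.mpr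
      left
      exact PySem.List.mem_pyRange_neg_one.mpr ⟨by omega, by omega⟩
  rw [pv_sorted_eq_flatMap (fun p => p.2) pairs (R ++ [0]) hDpair hDmem]
  rw [List.flatMap_append, List.filter_append]
  -- bucket 0 dies under the > 0 filter
  have h0nil : ([(0:Int)].flatMap (fun v => pairs.filter (fun p => p.2 == v))).filter (fun p => decide (0 < p.2)) = [] := by
    simp only [List.flatMap_cons, List.flatMap_nil, List.append_nil]
    rw [List.filter_filter]
    apply List.filter_eq_nil_iff.mpr
    intro p hp
    simp
    intro h
    omega
  rw [h0nil, List.append_nil]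
  -- buckets with positive score survive the filter untouched
  have hsurv : (R.flatMap (fun v => pairs.filter (fun p => p.2 == v))).filter (fun p => decide (0 < p.2))
      = R.flatMap (fun v => pairs.filter (fun p => p.2 == v)) := by
    apply List.filter_eq_self.mpr
    intro p hp
    obtain ⟨s, hs, hps⟩ := List.mem_flatMap.mp hp
    have : p.2 = s := by simpa using (List.mem_filter.mp hps).2
    have := hRpos s hs
    simp
    omega
  rw [hsurv, List.map_flatMap]
  -- pointwise over s ∈ R
  apply List.flatMap_congr
  intro s hs
  have hspos := hRpos s hs
  rw [hgetD s, hpairs, List.filter_map]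
  have : ((fun p : String × Int => p.2 == s) ∘ fun c => (c, sc c)) = fun c => sc c == s := rfl
  rw [this, List.map_map]
  have : ((fun p : String × Int => p.1) ∘ fun c => (c, sc c)) = id := rfl
  rw [this, List.map_id]
  rw [hfl, List.filter_filter]
  apply List.filter_congr
  intro c _
  by_cases h : sc c = s <;> simp [h]
  omega

-- ===== VERDICT (by name: the statement is the Claim_ definition above) =====
theorem rank_chunks_by_relevance_spec : Claim_equal_rank_chunks_by_relevance := by
  intro chunks question _
  exact pv_main_eq chunks question
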